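-- pv_equiv track=rewrite | github.com/phincallahan/project-euler | python/lib/permutations.py | binary_permutations
-- ===== SOURCE A (Python) =====
-- def binary_permutations(end):
--     def __inner(perm, end):
--         yield ''.join(perm)
--         for i in range(end):
--             perm[i] = '1'
--             yield from __inner(perm, i)
--             perm[i] = '0'
--
--     perm = []
--     for i in range(end):
--         perm.append('1')
--         yield from __inner(perm, i)
--         perm[i] = '0'
-- ===== SOURCE B (Python) =====
-- def binary_permutations(end):
--     # Iterative DFS with an explicit stack of (string, end) nodes instead of
--     # recursive generators mutating a shared list.
--     for i in range(end):
--         stack = [('0' * i + '1', i)]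
--         while stack:
--             cur, e = stack.pop()
--             yield cur
--             for j in reversed(range(e)):
--                 stack.append((cur[:j] + '1' + cur[j + 1:], j))
-- ===== Notes on version B (the rewrite author's own statement) =====
-- stated objective: alternative
-- what changed: Replaced the recursive nested generators that mutate a shared character list with an iterative DFS over an explicit stack of (string, end) nodes, pushing children in reverse to keep A's pre-order yield sequence.
import Mathlib
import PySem

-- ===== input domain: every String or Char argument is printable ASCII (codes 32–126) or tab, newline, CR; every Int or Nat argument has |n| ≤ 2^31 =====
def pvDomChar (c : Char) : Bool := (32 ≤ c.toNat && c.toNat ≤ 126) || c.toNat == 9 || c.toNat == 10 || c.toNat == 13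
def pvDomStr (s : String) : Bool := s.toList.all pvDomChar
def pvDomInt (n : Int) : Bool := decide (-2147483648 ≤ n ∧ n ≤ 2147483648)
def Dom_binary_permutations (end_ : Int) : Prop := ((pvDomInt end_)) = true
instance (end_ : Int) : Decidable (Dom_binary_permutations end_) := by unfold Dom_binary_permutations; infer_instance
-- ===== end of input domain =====

-- B replaces A's recursive generators (which mutate a shared char list) by an
-- explicit-stack iterative DFS over (string, end) nodes; same output list.
-- (Both Pythons are generators; equivalence is about the yielded sequence.)

-- ===== PORT A =====
-- A's __inner sets perm[i]='1', recurses, then restores perm[i]='0'; since the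
-- recursive call leaves perm as it found it, the port passes perm.set i '1' to
-- the recursive call and the untouched perm to the next iteration (exact).
def pvInnerA (perm : List Char) (e : Nat) : List String :=
  String.ofList perm ::
    (List.range e).attach.flatMap (fun ⟨i, hi⟩ => pvInnerA (perm.set i '1') i)
termination_by e
decreasing_by exact List.mem_range.mp hi

def binary_permutations (end_ : Int) : List String :=
  ((PySem.List.pyRange 0 end_ 1).foldl
    (fun (st : List Char × List String) i =>
      let perm := st.1 ++ ['1']                         -- perm.append('1')
      (perm.set i.toNat '0',                            -- perm[i] = '0' (i ≥ 0 in range(end))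
       st.2 ++ pvInnerA perm i.toNat))                  -- yield from __inner(perm, i)
    ([], [])).2

-- ===== PORT B =====
-- cur[:j] + '1' + cur[j+1:]
def pvSplice (cur : String) (j : Int) : String :=
  String.ofList (PySem.List.slice cur.toList none (some j) ++ ['1'] ++
                 PySem.List.slice cur.toList (some (j + 1)) none)

-- for j in reversed(range(e)): stack.append((cur[:j]+'1'+cur[j+1:], j))
-- (stack represented head-first: append = cons, pop = head)
def pvPush (cur : String) (e : Int) (rest : List (String × Int)) : List (String × Int) :=
  ((PySem.List.pyRange 0 e 1).reverse).foldl (fun st j => (pvSplice cur j, j) :: st) rest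

-- termination measure for the while-stack loop: each node (·, e) roots a
-- subtree of 2^e.toNat yields
def pvStackMeasure (st : List (String × Int)) : Nat :=
  (st.map (fun p => 2 ^ p.2.toNat)).sum

lemma pvFoldl_push_reverse {α β : Type} (f : α → β) (l : List α) (rest : List β) :
    l.reverse.foldl (fun st j => f j :: st) rest = l.map f ++ rest := by
  induction l generalizing rest with
  | nil => rfl
  | cons x l ih => simp [List.foldl_append, ih]

lemma pvGeom (n : Nat) : ((List.range n).map (fun k => 2 ^ k)).sum + 1 = 2 ^ n := by
  induction n with
  | zero => rfl
  | succ n ih =>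
      rw [List.range_succ, List.map_append, List.sum_append]
      simp only [List.map_cons, List.map_nil, List.sum_cons, List.sum_nil, pow_succ]
      omega

lemma pvPush_lt (cur : String) (e : Int) (rest : List (String × Int)) :
    pvStackMeasure (pvPush cur e rest) < pvStackMeasure ((cur, e) :: rest) := by
  unfold pvPush pvStackMeasure
  rw [pvFoldl_push_reverse, PySem.List.pyRange_one]
  simp only [List.map_append, List.sum_append, List.map_map, List.map_cons, List.sum_cons,
    Function.comp_def, zero_add, Int.toNat_natCast, Int.sub_zero]
  have := pvGeom e.toNat
  omega

def pvLoopB (stack : List (String × Int)) : List String :=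
  match stack with
  | [] => []
  | (cur, e) :: rest => cur :: pvLoopB (pvPush cur e rest)   -- pop, yield, push children
termination_by pvStackMeasure stack
decreasing_by exact pvPush_lt cur e rest

def binary_permutations_alt (end_ : Int) : List String :=
  (PySem.List.pyRange 0 end_ 1).flatMap (fun i =>
    pvLoopB [(String.ofList (PySem.List.pyRepeat ['0'] i ++ ['1']), i)])  -- '0'*i + '1'

-- ===== PRECONDITION & SPEC =====
def Spec_binary_permutations (end_ : Int) (out : List String) : Prop := out = binary_permutations_alt end_
instance (end_ : Int) (out : List String) : Decidable (Spec_binary_permutations end_ out) := by unfold Spec_binary_permutations; infer_instance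

-- ===== CLAIM (what is proved, stated in full; the proofs are below) =====
def Claim_equal_binary_permutations : Prop := ∀ (end_ : Int), Dom_binary_permutations end_ → Spec_binary_permutations end_ (binary_permutations end_)

-- ===== LEMMAS AND PROOFS =====

lemma pvRange_cast (b : Int) :
    PySem.List.pyRange 0 b 1 = (List.range b.toNat).map (fun (k : Nat) => (k : Int)) := by
  rw [PySem.List.pyRange_one]
  simp only [Int.sub_zero, zero_add]

lemma pvSplice_set (perm : List Char) (j : Nat) (h : j < perm.length) :
    pvSplice (String.ofList perm) (j : Int) = String.ofList (perm.set j '1') := by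
  unfold pvSplice
  rw [String.toList_ofList, PySem.List.slice_to_natCast]
  have hc : ((j : Int) + 1) = ((j + 1 : Nat) : Int) := by push_cast; ring
  rw [hc, PySem.List.slice_from_natCast, List.set_eq_take_cons_drop _ h]
  simp

lemma pvLoop_nil : pvLoopB [] = [] := by rw [pvLoopB]

lemma pvLoop_cons : ∀ (e : Nat) (perm : List Char) (rest : List (String × Int)),
    e ≤ perm.length →
    pvLoopB ((String.ofList perm, (e : Int)) :: rest) = pvInnerA perm e ++ pvLoopB rest := by
  intro e
  induction e using Nat.strong_induction_on with
  | _ e IH =>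
    intro perm rest he
    rw [pvLoopB]
    unfold pvPush
    rw [pvFoldl_push_reverse, pvRange_cast, List.map_map]
    rw [pvInnerA]
    simp only [List.mem_range, List.flatMap_subtype, List.unattach_attach, Int.toNat_natCast,
      Function.comp_def, List.cons_append]
    congr 1
    have key : ∀ (js : List Nat) (rest' : List (String × Int)), (∀ j ∈ js, j < e) →
        pvLoopB (js.map (fun (k : Nat) => (pvSplice (String.ofList perm) (k : Int), (k : Int))) ++ rest')
          = js.flatMap (fun j => pvInnerA (perm.set j '1') j) ++ pvLoopB rest' := by
      intro js
      induction js with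
      | nil => simp
      | cons j js ihj =>
        intro rest' hj
        have hje : j < e := hj j (List.mem_cons_self ..)
        have hjl : j < perm.length := lt_of_lt_of_le hje he
        simp only [List.map_cons, List.cons_append, List.flatMap_cons]
        rw [pvSplice_set perm j hjl]
        rw [IH j hje (perm.set j '1') _ (by rw [List.length_set]; omega)]
        rw [ihj rest' (fun x hx => hj x (List.mem_cons_of_mem _ hx))]
        simp
    exact key (List.range e) rest (fun j hj => List.mem_range.mp hj)

lemma pvSeed_set (n : Nat) :
    (List.replicate n '0' ++ ['1']).set n '0' = List.replicate (n + 1) '0' := by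
  have h : (List.replicate n '0' ++ ['1']).set n '0'
      = List.replicate n '0' ++ (['1'].set 0 '0') := by
    conv_lhs => rw [show n = (List.replicate n '0').length by simp]
    simp
  rw [h, List.replicate_succ']
  simp

lemma pvFoldA (n : Nat) :
    (((List.range n).map (fun (k : Nat) => (k : Int))).foldl
      (fun (st : List Char × List String) i =>
        let perm := st.1 ++ ['1']
        (perm.set i.toNat '0', st.2 ++ pvInnerA perm i.toNat)) ([], []))
    = (List.replicate n '0',
       (List.range n).flatMap (fun i => pvInnerA (List.replicate i '0' ++ ['1']) i)) := by
  induction n with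
  | zero => rfl
  | succ n ih =>
      rw [List.range_succ, List.map_append, List.foldl_append, ih]
      simp only [List.map_cons, List.map_nil, List.foldl_cons, List.foldl_nil,
        Int.toNat_natCast, List.flatMap_append, List.flatMap_cons, List.flatMap_nil,
        List.append_nil]
      rw [pvSeed_set]

lemma pvSeedLoop (i : Nat) :
    pvLoopB [(String.ofList (PySem.List.pyRepeat ['0'] (i : Int) ++ ['1']), (i : Int))]
      = pvInnerA (List.replicate i '0' ++ ['1']) i := by
  rw [PySem.List.pyRepeat_singleton, Int.toNat_natCast]
  rw [pvLoop_cons i (List.replicate i '0' ++ ['1']) [] (by simp)]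
  rw [pvLoop_nil, List.append_nil]

-- ===== VERDICT (by name: the statement is the Claim_ definition above) =====
theorem binary_permutations_spec : Claim_equal_binary_permutations := by
  intro end_ _
  show binary_permutations end_ = binary_permutations_alt end_
  unfold binary_permutations binary_permutations_alt
  rw [pvRange_cast, pvFoldA]
  rw [List.flatMap_map]
  exact List.flatMap_congr (fun i _ => (pvSeedLoop i).symm)
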